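-- pv_equiv track=rewrite | github.com/oumi-ai/oumi | scripts/install_cuda_deps.py | select_pytorch_cuda_version
-- ===== SOURCE A (Python) =====
-- CUDA_TO_PYTORCH = {
--     "12.9": "cu129",
--     "12.8": "cu128",
--     "12.6": "cu126",
--     "12.4": "cu124",
--     "12.1": "cu121",
--     "11.8": "cu118",
-- }
--
-- def select_pytorch_cuda_version(max_cuda: str) -> str | None:
--     """Select the best PyTorch CUDA version for the system."""
--     try:
--         max_major, max_minor = map(int, max_cuda.split("."))
--     except ValueError:
--         return None
--
--     # Find the highest compatible CUDA version
--     for cuda_ver, cuda_tag in sorted(CUDA_TO_PYTORCH.items(), reverse=True):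
--         ver_major, ver_minor = map(int, cuda_ver.split("."))
--         if (ver_major, ver_minor) <= (max_major, max_minor):
--             return cuda_tag
--
--     return None
-- ===== SOURCE B (Python) =====
-- CUDA_TO_PYTORCH = {
--     "12.9": "cu129",
--     "12.8": "cu128",
--     "12.6": "cu126",
--     "12.4": "cu124",
--     "12.1": "cu121",
--     "11.8": "cu118",
-- }
--
-- def select_pytorch_cuda_version(max_cuda: str) -> str | None:
--     """Select the best PyTorch CUDA version for the system."""
--     try:
--         max_major, max_minor = map(int, max_cuda.split("."))
--     except ValueError:
--         return None
--
--     # One pass: collect compatible versions, then take the numerically highest.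
--     compatible = []
--     for cuda_ver, cuda_tag in CUDA_TO_PYTORCH.items():
--         ver = tuple(map(int, cuda_ver.split(".")))
--         if ver <= (max_major, max_minor):
--             compatible.append((ver, cuda_tag))
--     if not compatible:
--         return None
--     return max(compatible, key=lambda e: e[0])[1]
-- ===== Notes on version B (the rewrite author's own statement) =====
-- stated objective: alternative
-- what changed: Replaces the sort-descending-then-return-first-hit scan with a single pass that collects compatible (major,minor) entries from the dict in insertion order and then takes the maximum by numeric version key.
import Mathlib
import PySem

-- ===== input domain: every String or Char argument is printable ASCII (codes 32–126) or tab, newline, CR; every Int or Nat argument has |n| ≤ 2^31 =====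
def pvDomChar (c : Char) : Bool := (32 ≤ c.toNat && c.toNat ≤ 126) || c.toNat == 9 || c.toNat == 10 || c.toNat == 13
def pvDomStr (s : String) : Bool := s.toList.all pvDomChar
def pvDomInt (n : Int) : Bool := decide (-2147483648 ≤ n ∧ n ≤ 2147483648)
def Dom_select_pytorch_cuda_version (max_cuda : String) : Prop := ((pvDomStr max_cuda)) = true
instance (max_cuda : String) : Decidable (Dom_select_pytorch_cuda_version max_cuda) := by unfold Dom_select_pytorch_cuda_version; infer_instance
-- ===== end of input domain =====

-- B replaces A's sort-descending-then-first-hit scan by filtering the compatible entries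
-- in one pass and taking the maximum by numeric version key (alternative decomposition).

-- ===== PORT A =====
-- the module constant CUDA_TO_PYTORCH, in dict insertion order
def cudaToPytorch : List (String × String) :=
  [("12.9", "cu129"), ("12.8", "cu128"), ("12.6", "cu126"),
   ("12.4", "cu124"), ("12.1", "cu121"), ("11.8", "cu118")]

-- `a, b = map(int, s.split("."))`: some (a, b) exactly when the split has two parts and
-- both parse; none exactly where Python raises ValueError (bad int, or wrong arity).
def pvParse2 (s : String) : Option (Int × Int) :=
  match PySem.Str.split? s "." with
  | some [a, b] =>
    match PySem.Int.ofStr? a, PySem.Int.ofStr? b with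
    | some x, some y => some (x, y)
    | _, _ => none
  | _ => none

-- A's for-loop over the sorted items: return the first tag whose version ≤ (M, m).
-- Python's tuple `<=` is lexicographic, written out explicitly here.
def pvFindTag (M m : Int) : List (String × String) → Option String
  | [] => none
  | (cuda_ver, cuda_tag) :: rest =>
    match pvParse2 cuda_ver with
    | some (a, b) =>
      if a < M ∨ (a = M ∧ b ≤ m) then some cuda_tag else pvFindTag M m rest
    | none => none  -- unreachable totality guard: every table key parses

def select_pytorch_cuda_version (max_cuda : String) : Option String :=
  match pvParse2 max_cuda with
  | none => none
  | some (M, m) =>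
    -- sorted(CUDA_TO_PYTORCH.items(), reverse=True): lexicographic on string pairs
    pvFindTag M m (PySem.List.sorted2 cudaToPytorch Prod.fst Prod.snd true)

-- ===== PORT B =====
def select_pytorch_cuda_version_alt (max_cuda : String) : Option String :=
  match pvParse2 max_cuda with
  | none => none
  | some (M, m) =>
    let compatible : List ((Int × Int) × String) :=
      cudaToPytorch.filterMap (fun kt =>
        match pvParse2 kt.1 with
        | some v => if v.1 < M ∨ (v.1 = M ∧ v.2 ≤ m) then some (v, kt.2) else none
        | none => none)  -- unreachable totality guard: every table key parses
    if compatible.isEmpty then none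
    else
      -- max(compatible, key=lambda e: e[0]) with a tuple key
      match PySem.List.max2? compatible (fun e => e.1.1) (fun e => e.1.2) with
      | some e => some e.2
      | none => none

-- ===== PRECONDITION & SPEC =====
def Spec_select_pytorch_cuda_version (max_cuda : String) (out : Option String) : Prop := out = select_pytorch_cuda_version_alt max_cuda
instance (max_cuda : String) (out : Option String) : Decidable (Spec_select_pytorch_cuda_version max_cuda out) := by unfold Spec_select_pytorch_cuda_version; infer_instance

-- ===== CLAIM (what is proved, stated in full; the proofs are below) =====
def Claim_equal_select_pytorch_cuda_version : Prop := ∀ (max_cuda : String), Dom_select_pytorch_cuda_version max_cuda → Spec_select_pytorch_cuda_version max_cuda (select_pytorch_cuda_version max_cuda)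

-- ===== LEMMAS AND PROOFS =====
lemma sorted_cudaTable :
    PySem.List.sorted2 cudaToPytorch Prod.fst Prod.snd true = cudaToPytorch := by
  simp only [PySem.List.sorted2, String.lt_iff_toList_lt]; decide

lemma parse_129 : pvParse2 "12.9" = some (12, 9) := by decide
lemma parse_128 : pvParse2 "12.8" = some (12, 8) := by decide
lemma parse_126 : pvParse2 "12.6" = some (12, 6) := by decide
lemma parse_124 : pvParse2 "12.4" = some (12, 4) := by decide
lemma parse_121 : pvParse2 "12.1" = some (12, 1) := by decide
lemma parse_118 : pvParse2 "11.8" = some (11, 8) := by decide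

-- ===== VERDICT (by name: the statement is the Claim_ definition above) =====
set_option maxHeartbeats 2000000 in
theorem select_pytorch_cuda_version_spec : Claim_equal_select_pytorch_cuda_version := by
  intro max_cuda _
  unfold Spec_select_pytorch_cuda_version
  unfold select_pytorch_cuda_version select_pytorch_cuda_version_alt
  rcases h : pvParse2 max_cuda with _ | ⟨M, m⟩
  · rfl
  · rw [sorted_cudaTable]
    simp only [cudaToPytorch, pvFindTag, List.filterMap_cons, List.filterMap_nil,
      parse_129, parse_128, parse_126, parse_124, parse_121, parse_118]
    split_ifs <;> first | omega | rfl | simp_all
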